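-- pv_equiv track=rewrite | github.com/nickmeinhold/the-dreaming-repo | src/immunity.py | _dreamed_since
-- ===== SOURCE A (Python) =====
-- def _dreamed_since(vitals: dict, pending: dict) -> bool:
--     """Has Flux dreamed since the oldest pending review?"""
--     if not pending:
--         return False
--     current_dreams = vitals.get("dream_count", 0)
--     oldest_review_dreams = min(
--         p.get("dream_count_at_review", current_dreams)
--         for p in pending.values()
--     )
--     return current_dreams > oldest_review_dreams
-- ===== SOURCE B (Python) =====
-- def _dreamed_since(vitals: dict, pending: dict) -> bool:
--     """Has Flux dreamed since the oldest pending review?"""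
--     current_dreams = vitals.get("dream_count", 0)
--     for p in pending.values():
--         if p.get("dream_count_at_review", current_dreams) < current_dreams:
--             return True
--     return False
-- ===== Notes on version B (the rewrite author's own statement) =====
-- stated objective: idiomatic
-- what changed: Replaces the accumulated min over all pending reviews plus a final comparison by a short-circuiting early-return loop that returns True at the first review whose recorded dream count is below the current one (the empty guard disappears: the loop handles it).
import Mathlib
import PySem

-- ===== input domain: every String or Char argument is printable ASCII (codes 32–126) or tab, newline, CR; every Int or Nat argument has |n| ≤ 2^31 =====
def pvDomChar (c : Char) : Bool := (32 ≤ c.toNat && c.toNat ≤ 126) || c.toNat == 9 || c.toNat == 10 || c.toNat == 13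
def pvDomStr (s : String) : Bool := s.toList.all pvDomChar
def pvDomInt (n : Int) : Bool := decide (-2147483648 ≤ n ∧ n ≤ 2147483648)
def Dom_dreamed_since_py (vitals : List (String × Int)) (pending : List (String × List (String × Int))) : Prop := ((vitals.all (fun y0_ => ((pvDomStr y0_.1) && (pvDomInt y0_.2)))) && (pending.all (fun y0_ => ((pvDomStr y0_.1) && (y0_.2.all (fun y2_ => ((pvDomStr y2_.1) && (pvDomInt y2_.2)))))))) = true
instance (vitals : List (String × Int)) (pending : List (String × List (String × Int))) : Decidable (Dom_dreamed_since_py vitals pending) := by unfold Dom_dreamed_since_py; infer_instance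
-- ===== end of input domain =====

-- B replaces A's accumulated minimum + final comparison by a short-circuiting early-return loop (idiomatic; same cost).
-- ===== PORT A =====
def dreamed_since_py (vitals : List (String × Int)) (pending : List (String × List (String × Int))) : Bool :=
  if (PySem.Dict.ofList pending).items.isEmpty then false
  else
    let current_dreams := (PySem.Dict.ofList vitals).getD "dream_count" 0
    match PySem.List.min? ((PySem.Dict.ofList pending).values.map
        (fun p => (PySem.Dict.ofList p).getD "dream_count_at_review" current_dreams)) (fun x => x) with
    | some oldest_review_dreams => decide (current_dreams > oldest_review_dreams)
    | none => false

-- ===== PORT B =====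
-- the early-return for-loop of Source B
def pvAltLoop (current_dreams : Int) : List (List (String × Int)) → Bool
  | [] => false
  | p :: rest =>
    if (PySem.Dict.ofList p).getD "dream_count_at_review" current_dreams < current_dreams then true
    else pvAltLoop current_dreams rest

def dreamed_since_py_alt (vitals : List (String × Int)) (pending : List (String × List (String × Int))) : Bool :=
  let current_dreams := (PySem.Dict.ofList vitals).getD "dream_count" 0
  pvAltLoop current_dreams (PySem.Dict.ofList pending).values

-- ===== PRECONDITION & SPEC =====
def Spec_dreamed_since_py (vitals : List (String × Int)) (pending : List (String × List (String × Int))) (out : Bool) : Prop := out = dreamed_since_py_alt vitals pending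
instance (vitals : List (String × Int)) (pending : List (String × List (String × Int))) (out : Bool) : Decidable (Spec_dreamed_since_py vitals pending out) := by unfold Spec_dreamed_since_py; infer_instance

-- ===== CLAIM (what is proved, stated in full; the proofs are below) =====
def Claim_equal_dreamed_since_py : Prop := ∀ (vitals : List (String × Int)) (pending : List (String × List (String × Int))), Dom_dreamed_since_py vitals pending → Spec_dreamed_since_py vitals pending (dreamed_since_py vitals pending)

-- ===== LEMMAS AND PROOFS =====

-- a running minimum compared once at the end equals an any-style existence check
lemma pv_min_lt_any (c : Int) (t : List Int) : ∀ x : Int,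
    decide (t.foldl min x < c) = (x :: t).any (fun v => decide (v < c)) := by
  induction t with
  | nil => intro x; simp
  | cons y t ih =>
    intro x
    have h1 := ih (min x y)
    have h2 : decide (min x y < c) = (decide (x < c) || decide (y < c)) := by
      by_cases hx : x < c <;> by_cases hy : y < c <;> simp [hx, hy]
    simp only [List.foldl_cons, List.any_cons] at *
    rw [h2, Bool.or_assoc] at h1
    exact h1

-- B's loop is the existence check over the mapped values
lemma pv_altLoop_any (c : Int) (ps : List (List (String × Int))) :
    pvAltLoop c ps = (ps.map (fun p => (PySem.Dict.ofList p).getD "dream_count_at_review" c)).any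
      (fun v => decide (v < c)) := by
  induction ps with
  | nil => rfl
  | cons p rest ih =>
    simp only [pvAltLoop, List.map_cons, List.any_cons, ih]
    split_ifs with h <;> simp [h]

-- ===== VERDICT (by name: the statement is the Claim_ definition above) =====
theorem dreamed_since_py_spec : Claim_equal_dreamed_since_py := by
  intro vitals pending _
  unfold Spec_dreamed_since_py dreamed_since_py dreamed_since_py_alt
  rw [pv_altLoop_any]
  cases hitems : (PySem.Dict.ofList pending).items with
  | nil => simp [PySem.Dict.values, hitems]
  | cons a l =>
    simp only [PySem.Dict.values, hitems, List.isEmpty_cons, List.map_cons,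
      Bool.false_eq_true, if_false]
    rw [PySem.List.min?_id_cons]
    show decide (_ > List.foldl min _ _) = _
    simp only [gt_iff_lt]
    exact pv_min_lt_any _ _ _
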